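-- pv_equiv track=rewrite | github.com/campbellmarianna/Code-Challenges | python/max_min_sum.py | min_max_sum
-- ===== SOURCE A (Python) =====
-- def min_max_sum(input):
--     # Initilize max and min
--     min = input[0]
--     max = input[0]
--     total = 0
--     output = []
--     # capture each number and do a check
--     for num in input:
--         # add number to total
--         total += num
--         # check if num at num is smaller than min
--         if num < min:
--             # set min to num
--             min = num
--         # check if num at index is greater than maxium
--         if num > max:
--             # set max to num
--             max = num
--     # once that is done so we have checked all the numbers in the input
--     # subtract min from total and store it in first_sum
--     first_sum = total - min
--     # append first_sum to output list
--     output.append(first_sum)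
--     # subtract max from total and store it in
--     second_sum = total - max
--     # append first_sum to output list
--     output.append(second_sum)
--     # output list
--     # converting integer list to string list and joining the list using join()
--     # res = int("".join(map(str, output)))
--     return output
-- ===== SOURCE B (Python) =====
-- def min_max_sum(input):
--     s = sorted(input)
--     total = sum(input)
--     return [total - s[0], total - s[-1]]
-- ===== Notes on version B (the rewrite author's own statement) =====
-- stated objective: alternative
-- what changed: Replaces the single min/max-tracking accumulator loop with sort-then-index: a sorted copy supplies min (s[0]) and max (s[-1]) while sum() totals the list.
import Mathlib
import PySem

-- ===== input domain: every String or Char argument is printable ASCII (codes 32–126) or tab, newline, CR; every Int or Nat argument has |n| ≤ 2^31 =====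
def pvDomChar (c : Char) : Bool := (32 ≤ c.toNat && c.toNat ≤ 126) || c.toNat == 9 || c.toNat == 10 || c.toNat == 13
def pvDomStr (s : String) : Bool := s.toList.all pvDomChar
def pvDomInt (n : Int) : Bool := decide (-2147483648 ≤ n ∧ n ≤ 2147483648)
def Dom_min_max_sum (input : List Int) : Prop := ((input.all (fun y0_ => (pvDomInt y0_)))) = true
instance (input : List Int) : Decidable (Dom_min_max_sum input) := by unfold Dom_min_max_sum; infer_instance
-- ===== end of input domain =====

-- B replaces A's single min/max-tracking pass by sort-then-index (s[0]/s[-1]) plus sum(); alternative decomposition, not faster.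

-- ===== PORT A =====
def min_max_sum (input : List Int) : List Int :=
  match PySem.List.pyGet? input 0 with
  | none => []          -- input[0] raises IndexError on []; excluded by Pre_
  | some h =>
    let st := input.foldl
      (fun (s : Int × Int × Int) num =>
        (if num < s.1 then num else s.1,
         if num > s.2.1 then num else s.2.1,
         s.2.2 + num))
      (h, h, 0)
    [st.2.2 - st.1, st.2.2 - st.2.1]

-- ===== PORT B =====
def min_max_sum_alt (input : List Int) : List Int :=
  let s := PySem.List.sorted input (fun x => x) false
  let total := input.sum
  match PySem.List.pyGet? s 0, PySem.List.pyGet? s (-1) with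
  | some mn, some mx => [total - mn, total - mx]
  | _, _ => []          -- s[0] raises IndexError on []; excluded by Pre_

-- ===== PRECONDITION & SPEC =====
-- A raises IndexError (input[0]) on the empty list, and so does B (s[0]); Pre_ excludes it.
def Pre_min_max_sum (input : List Int) : Prop := input ≠ []
instance (input : List Int) : Decidable (Pre_min_max_sum input) := by unfold Pre_min_max_sum; infer_instance
def pvWitness_min_max_sum : List Int := [3, -1, 4]

def Spec_min_max_sum (input : List Int) (out : List Int) : Prop := out = min_max_sum_alt input
instance (input : List Int) (out : List Int) : Decidable (Spec_min_max_sum input out) := by unfold Spec_min_max_sum; infer_instance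

-- ===== CLAIM (what is proved, stated in full; the proofs are below) =====
def Claim_equal_min_max_sum : Prop := ∀ (input : List Int), Dom_min_max_sum input → Pre_min_max_sum input → Spec_min_max_sum input (min_max_sum input)

-- ===== LEMMAS AND PROOFS =====

-- A's loop computes (running min, running max, running total).
theorem minmaxsum_loop (l : List Int) (mn mx total : Int) :
    l.foldl
      (fun (s : Int × Int × Int) num =>
        (if num < s.1 then num else s.1,
         if num > s.2.1 then num else s.2.1,
         s.2.2 + num))
      (mn, mx, total)
    = (l.foldl min mn, l.foldl max mx, total + l.sum) := by
  induction l generalizing mn mx total with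
  | nil => simp
  | cons x t ih =>
    simp only [List.foldl_cons, List.sum_cons, ih]
    have h1 : (if x < mn then x else mn) = min mn x := by
      rw [min_def]; split_ifs <;> omega
    have h2 : (if x > mx then x else mx) = max mx x := by
      rw [max_def]; split_ifs <;> omega
    rw [h1, h2]
    ring_nf

-- the sorted list's head is the running minimum
theorem head_sorted_eq_foldl_min (x : Int) (t : List Int) (h : Int) (r : List Int)
    (hs : PySem.List.sorted (x :: t) (fun y => y) false = h :: r) :
    h = t.foldl min x := by
  have hMmem : t.foldl min x ∈ (x :: t) :=
    PySem.List.min?_mem (xs := x :: t) (key := fun y => y) (PySem.List.min?_id_cons x t)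
  have hMmin : ∀ y ∈ (x :: t), t.foldl min x ≤ y :=
    PySem.List.min?_isMin (xs := x :: t) (key := fun y => y) (PySem.List.min?_id_cons x t)
  have hh_le : ∀ y ∈ (x :: t), h ≤ y := PySem.List.key_head_sorted_le _ _ hs
  have hh_mem : h ∈ (x :: t) := by
    have : h ∈ PySem.List.sorted (x :: t) (fun y => y) false := by rw [hs]; exact List.mem_cons_self
    exact (PySem.List.mem_sorted _ _ _ _).mp this
  exact le_antisymm (hh_le _ hMmem) (hMmin _ hh_mem)

-- the sorted list's last element is the running maximum
theorem last_sorted_eq_foldl_max (x : Int) (t : List Int) (L : Int)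
    (hL : (PySem.List.sorted (x :: t) (fun y => y) false).getLast? = some L) :
    L = t.foldl max x := by
  set s := PySem.List.sorted (x :: t) (fun y => y) false with hsdef
  have hXmem : t.foldl max x ∈ (x :: t) :=
    PySem.List.max?_mem (xs := x :: t) (key := fun y => y) (PySem.List.max?_id_cons x t)
  have hXmax : ∀ y ∈ (x :: t), y ≤ t.foldl max x :=
    PySem.List.max?_isMax (xs := x :: t) (key := fun y => y) (PySem.List.max?_id_cons x t)
  have hsne : s ≠ [] := by
    intro hnil; rw [hnil] at hL; simp at hL
  have hLget : L = s.getLast hsne := by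
    have := List.getLast?_eq_some_getLast (l := s) hsne
    rw [this] at hL; exact (Option.some.injEq _ _).mp hL.symm
  have hlen : 0 < s.length := List.length_pos_iff.mpr hsne
  have hLelem : L = s[s.length - 1]'(by omega) := by
    rw [hLget]; exact List.getLast_eq_getElem hsne
  have hL_ge : ∀ y ∈ s, y ≤ L := by
    intro y hy
    obtain ⟨p, hp, hpy⟩ := List.mem_iff_getElem.mp hy
    have := PySem.List.sorted_id_getElem_mono (x :: t)
      (p := p) (q := s.length - 1) (by omega) (by rw [← hsdef]; omega)
    rw [hLelem, ← hpy]
    exact this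
  have hL_mem : L ∈ (x :: t) := by
    have : L ∈ s := by
      rw [hLelem]; exact List.getElem_mem _
    exact (PySem.List.mem_sorted _ _ _ _).mp this
  have hmem' : t.foldl max x ∈ s := (PySem.List.mem_sorted _ _ _ _).mpr hXmem
  exact le_antisymm (hXmax _ hL_mem) (hL_ge _ hmem')

-- ===== VERDICT (by name: the statement is the Claim_ definition above) =====
theorem min_max_sum_spec : Claim_equal_min_max_sum := by
  intro input _ hpre
  obtain ⟨x, t, rfl⟩ : ∃ x t, input = x :: t := by
    cases input with
    | nil => exact absurd rfl hpre
    | cons a b => exact ⟨a, b, rfl⟩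
  unfold Spec_min_max_sum min_max_sum min_max_sum_alt
  have hsne : PySem.List.sorted (x :: t) (fun y => y) false ≠ [] := by
    intro h
    exact (List.cons_ne_nil x t) ((PySem.List.sorted_eq_nil_iff _ _ _).mp h)
  obtain ⟨h, r, hs⟩ : ∃ h r, PySem.List.sorted (x :: t) (fun y => y) false = h :: r := by
    cases hseq : PySem.List.sorted (x :: t) (fun y => y) false with
    | nil => exact absurd hseq hsne
    | cons a b => exact ⟨a, b, rfl⟩
  obtain ⟨L, hL⟩ : ∃ L, (PySem.List.sorted (x :: t) (fun y => y) false).getLast? = some L := by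
    rw [hs]; exact ⟨(h :: r).getLast (List.cons_ne_nil _ _), List.getLast?_eq_some_getLast _⟩
  simp only [PySem.List.pyGet?_zero_cons, PySem.List.pyGet?_neg_one, hs, minmaxsum_loop,
    List.foldl_cons]
  rw [← hs, hL]
  simp only [lt_irrefl, if_false, List.sum_cons]
  rw [head_sorted_eq_foldl_min x t h r hs, last_sorted_eq_foldl_max x t L hL]
  ring_nf
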